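-- pv_equiv track=rewrite | github.com/Aadya-Jain/python | 3_advanced/chapter17/solutions/min_superset.py | findMinSupersetLength
-- ===== SOURCE A (Python) =====
-- def findMinSupersetLength(sets):
--   total = 0
--   for i in range(3):
--     total += len(sets[i])
--   for i in range(3):
--     prevIndex = ((i-1)+3)%3
--     nextIndex = (i+1)%3
--     total -= len(sets[prevIndex].intersection(sets[nextIndex]))
--   total += len(sets[0].intersection(sets[1]).intersection(sets[2]))
--   return total
-- ===== SOURCE B (Python) =====
-- def findMinSupersetLength(sets):
--   # Directly build the union of the three sets and count it.
--   return len(sets[0] | sets[1] | sets[2])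
-- ===== Notes on version B (the rewrite author's own statement) =====
-- stated objective: simpler
-- what changed: Replaces the inclusion-exclusion arithmetic (sum of sizes, minus pairwise intersections, plus the triple intersection) by constructing the union of the three sets once and returning its size.
import Mathlib
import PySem

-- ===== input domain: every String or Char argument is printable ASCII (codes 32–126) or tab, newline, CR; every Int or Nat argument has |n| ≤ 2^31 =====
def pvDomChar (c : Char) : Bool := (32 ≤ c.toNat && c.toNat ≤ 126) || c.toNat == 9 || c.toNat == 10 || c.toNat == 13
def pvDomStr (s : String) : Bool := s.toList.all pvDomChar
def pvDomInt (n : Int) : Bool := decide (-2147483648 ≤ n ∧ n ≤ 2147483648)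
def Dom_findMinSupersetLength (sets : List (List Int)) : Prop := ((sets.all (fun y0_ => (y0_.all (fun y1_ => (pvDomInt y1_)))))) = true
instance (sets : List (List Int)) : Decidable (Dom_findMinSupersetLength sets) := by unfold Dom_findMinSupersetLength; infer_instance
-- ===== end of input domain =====

-- B builds the three-way union once and counts it, instead of A's inclusion-exclusion arithmetic (simpler).
-- The Python parameter holds sets; each inner List Int is marshalled through PySem.Set.ofList in both ports.

-- ===== PORT A =====
def findMinSupersetLength (sets : List (List Int)) : Int :=
  let s := sets.map (fun xs => PySem.Set.ofList xs)
  -- total = 0; for i in range(3): total += len(sets[i])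
  let total : Int := (PySem.List.pyRange 0 3 1).foldl
    (fun t i => t + PySem.Set.len (PySem.List.pyGetD s i [])) 0
  -- for i in range(3): total -= len(sets[prev].intersection(sets[next]))
  let total := (PySem.List.pyRange 0 3 1).foldl
    (fun t i =>
      let prevIndex := PySem.Int.mod ((i - 1) + 3) 3
      let nextIndex := PySem.Int.mod (i + 1) 3
      t - PySem.Set.len (PySem.Set.inter (PySem.List.pyGetD s prevIndex [])
            (PySem.List.pyGetD s nextIndex []))) total
  total + PySem.Set.len (PySem.Set.inter
    (PySem.Set.inter (PySem.List.pyGetD s 0 []) (PySem.List.pyGetD s 1 []))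
    (PySem.List.pyGetD s 2 []))

-- ===== PORT B =====
def findMinSupersetLength_alt (sets : List (List Int)) : Int :=
  let s := sets.map (fun xs => PySem.Set.ofList xs)
  PySem.Set.len (PySem.Set.union
    (PySem.Set.union (PySem.List.pyGetD s 0 []) (PySem.List.pyGetD s 1 []))
    (PySem.List.pyGetD s 2 []))

-- ===== PRECONDITION & SPEC =====
-- Pre_ excludes inputs with fewer than 3 sets, on which Python A raises IndexError.
def Pre_findMinSupersetLength (sets : List (List Int)) : Prop := 3 ≤ sets.length
instance (sets : List (List Int)) : Decidable (Pre_findMinSupersetLength sets) := by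
  unfold Pre_findMinSupersetLength; infer_instance

def pvWitness_findMinSupersetLength : List (List Int) := [[1, 2], [2, 3], [3, 4]]

def Spec_findMinSupersetLength (sets : List (List Int)) (out : Int) : Prop := out = findMinSupersetLength_alt sets
instance (sets : List (List Int)) (out : Int) : Decidable (Spec_findMinSupersetLength sets out) := by unfold Spec_findMinSupersetLength; infer_instance

-- ===== CLAIM (what is proved, stated in full; the proofs are below) =====
def Claim_equal_findMinSupersetLength : Prop := ∀ (sets : List (List Int)), Dom_findMinSupersetLength sets → Pre_findMinSupersetLength sets → Spec_findMinSupersetLength sets (findMinSupersetLength sets)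

-- ===== LEMMAS AND PROOFS =====

-- length of a nodup list as a Finset card, in Int
theorem pv_len_toFinset (l : List Int) (h : l.Nodup) :
    (l.length : Int) = (l.toFinset.card : Int) := by
  rw [List.toFinset_card_of_nodup h]

theorem pv_toFinset_inter (s t : List Int) :
    (PySem.Set.inter s t).toFinset = s.toFinset ∩ t.toFinset := by
  ext x
  simp [PySem.Set.mem_inter]

theorem pv_toFinset_union (s t : List Int) :
    (PySem.Set.union s t).toFinset = s.toFinset ∪ t.toFinset := by
  ext x
  simp [PySem.Set.mem_union]

theorem pv_three_incl_excl (A B C : Finset Int) :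
    ((A.card : Int) + B.card + C.card) - (C ∩ B).card - (A ∩ C).card - (B ∩ A).card
      + (A ∩ B ∩ C).card = ((A ∪ B ∪ C).card : Int) := by
  have h1 := Finset.card_union_add_card_inter A B
  have h2 := Finset.card_union_add_card_inter (A ∪ B) C
  have h3 : (A ∪ B) ∩ C = (A ∩ C) ∪ (B ∩ C) := Finset.union_inter_distrib_right ..
  have h4 := Finset.card_union_add_card_inter (A ∩ C) (B ∩ C)
  have h5 : (A ∩ C) ∩ (B ∩ C) = A ∩ B ∩ C := by
    ext x; simp
  have h6 : (C ∩ B).card = (B ∩ C).card := by rw [Finset.inter_comm]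
  have h7 : (B ∩ A).card = (A ∩ B).card := by rw [Finset.inter_comm]
  rw [h3] at h2
  rw [h5] at h4
  omega

-- ===== VERDICT (by name: the statement is the Claim_ definition above) =====
theorem findMinSupersetLength_spec : Claim_equal_findMinSupersetLength := by
  intro sets _ hpre
  unfold Pre_findMinSupersetLength at hpre
  match sets with
  | a :: b :: c :: rest =>
    unfold Spec_findMinSupersetLength findMinSupersetLength findMinSupersetLength_alt
    have hr : PySem.List.pyRange 0 3 1 = [0, 1, 2] := by decide
    simp only [hr, List.foldl, List.map, PySem.Int.mod, PySem.Set.len]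
    norm_num
    simp only [show Int.fmod 2 3 = (2 : Int) from by decide,
      show Int.fmod 1 3 = (1 : Int) from by decide,
      show Int.fmod 4 3 = (1 : Int) from by decide,
      PySem.List.pyGetD_ofNat', List.getD]
    simp only [List.getElem?_cons_zero, List.getElem?_cons_succ, Option.getD_some]
    have hA := PySem.Set.nodup_ofList (xs := a)
    have hB := PySem.Set.nodup_ofList (xs := b)
    have hC := PySem.Set.nodup_ofList (xs := c)
    rw [pv_len_toFinset _ hA, pv_len_toFinset _ hB, pv_len_toFinset _ hC,
      pv_len_toFinset _ (PySem.Set.nodup_inter _ _ hC),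
      pv_len_toFinset _ (PySem.Set.nodup_inter _ _ hA),
      pv_len_toFinset _ (PySem.Set.nodup_inter _ _ hB),
      pv_len_toFinset _ (PySem.Set.nodup_inter _ _ (PySem.Set.nodup_inter _ _ hA)),
      pv_len_toFinset _ (PySem.Set.nodup_union _ _ (PySem.Set.nodup_union _ _ hA))]
    simp only [pv_toFinset_inter, pv_toFinset_union]
    exact pv_three_incl_excl _ _ _
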